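-- pv_equiv track=rewrite | github.com/Aruk2004/GFG_POTD | Mar_2024/Mar_09.py | nthCharacter
-- ===== SOURCE A (Python) =====
-- def nthCharacter(s, r, n):
--     length = len(s)
--     for i in range(r):
--         temp = s
--         for j in range(length):
--             if temp[j // 2] == '0':
--                 s = s[:j] + str(0 + (j % 2)) + s[j + 1:]
--             else:
--                 s = s[:j] + str(1 - (j % 2)) + s[j + 1:]
--     return s[n]
-- ===== SOURCE B (Python) =====
-- def nthCharacter(s, r, n):
--     if r <= 0:
--         return s[n]
--     # Trace the requested position back through the rounds instead of
--     # rewriting the whole string: after each round, position j came from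
--     # position j//2 with its bit flipped when j is odd.
--     idx = n % len(s)
--     parity = 0
--     rem = r
--     while rem > 0 and idx > 0:
--         parity ^= idx & 1
--         idx >>= 1
--         rem -= 1
--     bit = (0 if s[idx] == '0' else 1) ^ parity
--     return str(bit)
-- ===== Notes on version B (the rewrite author's own statement) =====
-- stated objective: faster
-- what changed: Instead of rewriting the whole string r times (each round rebuilding it character by character with slices), B traces the single requested index backwards through the rounds (j -> j//2, accumulating the parity of the dropped bits) and reads one character of the original string.
import Mathlib
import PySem

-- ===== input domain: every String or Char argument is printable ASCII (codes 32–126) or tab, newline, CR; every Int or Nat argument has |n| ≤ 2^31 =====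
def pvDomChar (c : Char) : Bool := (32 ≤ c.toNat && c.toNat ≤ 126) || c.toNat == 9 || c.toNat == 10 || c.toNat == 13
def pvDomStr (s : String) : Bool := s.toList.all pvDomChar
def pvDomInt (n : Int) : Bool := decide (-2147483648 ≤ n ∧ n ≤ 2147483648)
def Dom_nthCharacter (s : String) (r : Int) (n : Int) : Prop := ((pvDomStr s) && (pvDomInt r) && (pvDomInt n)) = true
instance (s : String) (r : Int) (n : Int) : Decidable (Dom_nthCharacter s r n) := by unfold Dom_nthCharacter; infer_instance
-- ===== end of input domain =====

-- B replaces A's r full string rewrites by tracing the requested index back through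
-- the rounds (j -> j//2 with a parity accumulator) — an asymptotically faster algorithm.

-- ===== PORT A =====
-- literal port of A on the List Char side; the final s[n] (IndexError possible) is
-- pyGetD under Pre_ (Raise.InRange), exact there.
def nthCharacter (s : String) (r : Int) (n : Int) : String :=
  let ls := s.toList
  let length : Int := (ls.length : Int)
  let final : List Char :=
    (PySem.List.pyRange 0 r 1).foldl (fun st _i =>
      let temp := st
      (PySem.List.pyRange 0 length 1).foldl (fun st j =>
        if PySem.List.pyGetD temp (PySem.Int.floordiv j 2) ' ' = '0' then
          PySem.List.slice st none (some j) ++ (PySem.Int.toStr (0 + PySem.Int.mod j 2)).toList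
            ++ PySem.List.slice st (some (j + 1)) none
        else
          PySem.List.slice st none (some j) ++ (PySem.Int.toStr (1 - PySem.Int.mod j 2)).toList
            ++ PySem.List.slice st (some (j + 1)) none) st) ls
  String.ofList [PySem.List.pyGetD final n ' ']

-- ===== PORT B =====
-- the while loop of Source B: fuel = remaining rounds, stops early when idx = 0;
-- idx and parity are nonnegative throughout, so they are carried as Nat.
def altTrace : Nat → Nat → Nat → Nat × Nat
  | 0, idx, p => (idx, p)
  | rem + 1, idx, p =>
      if 0 < idx then altTrace rem (idx / 2) (p ^^^ idx % 2) else (idx, p)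

def nthCharacter_alt (s : String) (r : Int) (n : Int) : String :=
  if r ≤ 0 then
    String.ofList [PySem.List.pyGetD s.toList n ' ']
  else
    let idx : Nat := (PySem.Int.mod n (s.toList.length : Int)).toNat  -- n % len(s) ≥ 0 here
    let ip := altTrace r.toNat idx 0
    let bit : Nat := (if PySem.List.pyGetD s.toList (ip.1 : Int) ' ' = '0' then 0 else 1) ^^^ ip.2
    PySem.Int.toStr (bit : Int)

-- ===== PRECONDITION & SPEC =====
-- excluded: exactly the inputs where A raises — s[n] out of range (IndexError),
-- including the empty string.
def Pre_nthCharacter (s : String) (r : Int) (n : Int) : Prop :=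
  PySem.Raise.InRange s.toList.length n
instance (s : String) (r : Int) (n : Int) : Decidable (Pre_nthCharacter s r n) := by
  unfold Pre_nthCharacter; infer_instance

def pvWitness_nthCharacter : String × Int × Int := ("0110", 3, 2)

def Spec_nthCharacter (s : String) (r : Int) (n : Int) (out : String) : Prop := out = nthCharacter_alt s r n
instance (s : String) (r : Int) (n : Int) (out : String) : Decidable (Spec_nthCharacter s r n out) := by unfold Spec_nthCharacter; infer_instance

-- ===== CLAIM (what is proved, stated in full; the proofs are below) =====
def Claim_equal_nthCharacter : Prop := ∀ (s : String) (r : Int) (n : Int), Dom_nthCharacter s r n → Pre_nthCharacter s r n → Spec_nthCharacter s r n (nthCharacter s r n)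

-- ===== LEMMAS AND PROOFS =====

-- bit value of a character ('0' ↦ 0, anything else ↦ 1) and the character of a bit
def bv (c : Char) : Nat := if c = '0' then 0 else 1
def bc (b : Nat) : Char := if b = 0 then '0' else '1'

-- parity accumulated when tracing index j back through k rounds
def par : Nat → Nat → Nat
  | 0, _ => 0
  | k + 1, j => (j % 2) ^^^ par k (j / 2)

-- one round of A as a pure map: position j gets the bit of position j/2, flipped iff j is odd
def roundSpec (t : List Char) : List Char :=
  (List.range t.length).map (fun j => bc (bv (t.getD (j / 2) ' ') ^^^ (j % 2)))

-- the inner-loop body of A, named for the proofs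
def Abody (temp st : List Char) (j : Int) : List Char :=
  if PySem.List.pyGetD temp (PySem.Int.floordiv j 2) ' ' = '0' then
    PySem.List.slice st none (some j) ++ (PySem.Int.toStr (0 + PySem.Int.mod j 2)).toList
      ++ PySem.List.slice st (some (j + 1)) none
  else
    PySem.List.slice st none (some j) ++ (PySem.Int.toStr (1 - PySem.Int.mod j 2)).toList
      ++ PySem.List.slice st (some (j + 1)) none

theorem portA_unfold (s : String) (r n : Int) :
    nthCharacter s r n = String.ofList [PySem.List.pyGetD
      ((PySem.List.pyRange 0 r 1).foldl
        (fun st _ => (PySem.List.pyRange 0 ((s.toList.length : Nat) : Int) 1).foldl (Abody st) st)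
        s.toList) n ' '] := rfl

theorem take_set_succ (l : List Char) (n : Nat) (c : Char) (h : n < l.length) :
    (l.set n c).take (n+1) = l.take n ++ [c] := by
  apply List.ext_getElem
  · simp; omega
  · intro i h1 h2
    simp only [List.getElem_take, List.getElem_set]
    by_cases hi : i = n
    · subst hi; simp [List.getElem_append_right, List.length_take, Nat.min_eq_left (Nat.le_of_lt h)]
    · have hin : i < n := by simp at h1; omega
      simp [List.getElem_append_left (by simp; omega : i < (l.take n).length), List.getElem_take]
      intro hh; omega

theorem Abody_eq (temp u : List Char) (j : Nat) (hj : j < u.length) :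
    Abody temp u (j : Int) = u.set j (bc (bv (temp.getD (j / 2) ' ') ^^^ (j % 2))) := by
  have hfd : PySem.Int.floordiv (j : Int) 2 = ((j / 2 : Nat) : Int) := by
    exact_mod_cast PySem.Int.floordiv_natCast j 2
  have hmd : PySem.Int.mod (j : Int) 2 = ((j % 2 : Nat) : Int) := by
    exact_mod_cast PySem.Int.mod_natCast j 2
  have hs1 : PySem.List.slice u none (some (j : Int)) = u.take j := PySem.List.slice_to_natCast u j
  have hs2 : PySem.List.slice u (some ((j : Int) + 1)) none = u.drop (j + 1) := by
    have : ((j : Int) + 1) = ((j + 1 : Nat) : Int) := by push_cast; ring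
    rw [this, PySem.List.slice_from_natCast]
  have hset : u.set j (bc (bv (temp.getD (j / 2) ' ') ^^^ (j % 2)))
      = u.take j ++ bc (bv (temp.getD (j / 2) ' ') ^^^ (j % 2)) :: u.drop (j + 1) := by
    rw [List.set_eq_take_append_cons_drop]; rw [if_pos hj]
  simp only [Abody]
  rw [hfd, hmd, hs1, hs2, hset, PySem.List.pyGetD_natCast]
  rcases Nat.mod_two_eq_zero_or_one j with h2 | h2 <;> rw [h2] <;>
    by_cases h0 : temp[j / 2]?.getD ' ' = '0' <;>
      simp [h0, bv, bc, List.getD,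
        (by decide : (PySem.Int.toStr 0).toList = ['0']),
        (by decide : (PySem.Int.toStr 1).toList = ['1'])]

theorem length_roundSpec (t : List Char) : (roundSpec t).length = t.length := by
  simp [roundSpec]

theorem getElem_roundSpec (t : List Char) (j : Nat) (h : j < (roundSpec t).length) :
    (roundSpec t)[j] = bc (bv (t.getD (j / 2) ' ') ^^^ (j % 2)) := by
  simp [roundSpec]

theorem inner_spec (temp : List Char) : ∀ (k m : Nat) (u : List Char),
    u.length = temp.length → m + k = temp.length →
    (PySem.List.pyRange (m : Int) ((temp.length : Nat) : Int) 1).foldl (Abody temp) u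
      = u.take m ++ (roundSpec temp).drop m := by
  intro k
  induction k with
  | zero =>
    intro m u hu hm
    rw [PySem.List.pyRange_one_eq_nil (by exact_mod_cast (by omega : temp.length ≤ m))]
    simp only [List.foldl_nil]
    have hm' : m = temp.length := by omega
    rw [hm', ← hu, List.take_length, List.drop_of_length_le (by rw [length_roundSpec]; omega),
      List.append_nil]
  | succ k ih =>
    intro m u hu hm
    have hml : m < temp.length := by omega
    rw [PySem.List.pyRange_one_cons (by exact_mod_cast hml)]
    rw [List.foldl_cons, Abody_eq temp u m (by omega)]
    have hcast : ((m : Int) + 1) = ((m + 1 : Nat) : Int) := by push_cast; ring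
    rw [hcast, ih (m + 1) _ (by simp [hu]) (by omega)]
    set c := bc (bv (temp.getD (m / 2) ' ') ^^^ (m % 2)) with hc
    rw [take_set_succ u m c (by omega)]
    have hdrop : (roundSpec temp).drop m = c :: (roundSpec temp).drop (m + 1) := by
      rw [List.drop_eq_getElem_cons (by rw [length_roundSpec]; omega)]
      rw [getElem_roundSpec]
    rw [hdrop]; simp

theorem iter_length (k : Nat) (t : List Char) : (roundSpec^[k] t).length = t.length := by
  induction k generalizing t with
  | zero => rfl
  | succ k ih => rw [Function.iterate_succ_apply, ih, length_roundSpec]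

theorem outer_spec (ls : List Char) : ∀ (L : List Int) (t : List Char), t.length = ls.length →
    L.foldl (fun st _ => (PySem.List.pyRange 0 ((ls.length : Nat) : Int) 1).foldl (Abody st) st) t
      = roundSpec^[L.length] t := by
  intro L
  induction L with
  | nil => intro t _; rfl
  | cons x L ih =>
    intro t ht
    rw [List.foldl_cons]
    have hone : (PySem.List.pyRange 0 ((ls.length : Nat) : Int) 1).foldl (Abody t) t
        = roundSpec t := by
      have h0 : (0 : Int) = ((0 : Nat) : Int) := rfl
      rw [← ht, h0, inner_spec t t.length 0 t rfl (by omega)]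
      simp
    rw [hone, ih (roundSpec t) (by rw [length_roundSpec, ht]),
      List.length_cons, Function.iterate_succ_apply]

theorem par_zero (k : Nat) : par k 0 = 0 := by
  induction k with
  | zero => rfl
  | succ k ih => simp [par, ih]

theorem par_le_one (k j : Nat) : par k j ≤ 1 := by
  induction k generalizing j with
  | zero => simp [par]
  | succ k ih =>
    have h2 : j % 2 ≤ 1 := by omega
    have := ih (j / 2)
    simp only [par]
    interval_cases h : (j % 2) <;> interval_cases h' : par k (j / 2) <;> decide

theorem bv_bc (b : Nat) (hb : b ≤ 1) : bv (bc b) = b := by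
  interval_cases b <;> decide

theorem getD_roundSpec (t : List Char) (j : Nat) (h : j < t.length) :
    (roundSpec t).getD j ' ' = bc (bv (t.getD (j / 2) ' ') ^^^ (j % 2)) := by
  rw [List.getD_eq_getElem _ _ (by rw [length_roundSpec]; omega), getElem_roundSpec]

theorem iter_getD (k : Nat) : ∀ (t : List Char) (j : Nat), j < t.length →
    (roundSpec^[k+1] t).getD j ' ' = bc (bv (t.getD (j / 2 ^ (k+1)) ' ') ^^^ par (k+1) j) := by
  induction k with
  | zero =>
    intro t j hj
    rw [Function.iterate_one, getD_roundSpec t j hj]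
    simp [par, pow_one]
  | succ k ih =>
    intro t j hj
    rw [Function.iterate_succ_apply', getD_roundSpec _ j (by rw [iter_length]; omega)]
    rw [ih t (j / 2) (by omega)]
    have hb : bv (t.getD (j / 2 / 2 ^ (k+1)) ' ') ≤ 1 := by unfold bv; split <;> omega
    rw [bv_bc _ (by
      have := par_le_one (k+1) (j / 2)
      interval_cases h : bv (t.getD (j / 2 / 2 ^ (k+1)) ' ') <;>
        interval_cases h' : par (k+1) (j / 2) <;> decide)]
    have hdiv : j / 2 / 2 ^ (k+1) = j / 2 ^ (k+2) := by
      rw [Nat.div_div_eq_div_mul, ← pow_succ']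
    have hpar : par (k+2) j = (j % 2) ^^^ par (k+1) (j / 2) := rfl
    rw [hdiv, hpar, Nat.xor_comm (j % 2) (par (k+1) (j / 2)), ← Nat.xor_assoc]

theorem altTrace_eq : ∀ (k idx p : Nat), altTrace k idx p = (idx / 2 ^ k, p ^^^ par k idx) := by
  intro k
  induction k with
  | zero => intro idx p; simp [altTrace, par]
  | succ k ih =>
    intro idx p
    by_cases h : 0 < idx
    · rw [altTrace, if_pos h, ih]
      have hdiv : idx / 2 / 2 ^ k = idx / 2 ^ (k+1) := by
        rw [Nat.div_div_eq_div_mul, ← pow_succ']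
      have hpar : par (k+1) idx = (idx % 2) ^^^ par k (idx / 2) := rfl
      rw [hdiv, hpar, ← Nat.xor_assoc]
    · have hidx : idx = 0 := by omega
      subst hidx
      rw [altTrace, if_neg h]
      simp [par_zero]

-- Python indexing s[n] under InRange, as a getD at the wrapped (mod-length) index
theorem pyGetD_mod (xs : List Char) (n : Int) (hlen : 0 < xs.length)
    (h : PySem.Raise.InRange xs.length n) :
    PySem.List.pyGetD xs n ' ' = xs.getD (PySem.Int.mod n (xs.length : Int)).toNat ' ' := by
  obtain ⟨h1, h2⟩ := h
  have hlen' : (0 : Int) < (xs.length : Int) := by exact_mod_cast hlen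
  rw [PySem.Int.mod_eq_emod_of_pos hlen']
  by_cases hn : 0 ≤ n
  · have hmod : n % (xs.length : Int) = n := Int.emod_eq_of_lt hn h2
    rw [hmod, ← Int.toNat_of_nonneg hn, PySem.List.pyGetD_natCast]
    congr 1
  · have hmod : n % (xs.length : Int) = n + xs.length := by
      rw [← Int.add_emod_right]
      exact Int.emod_eq_of_lt (by omega) (by omega)
    have hk : n = -(((-n).toNat : Nat) : Int) := by omega
    rw [hmod, hk, PySem.List.pyGetD_neg_natCast xs _ ' ' (by omega) (by omega)]
    rw [List.getD_eq_getElem _ _ (by omega)]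
    congr 1
    omega

theorem bit_toStr (b : Nat) (hb : b ≤ 1) :
    PySem.Int.toStr ((b : Nat) : Int) = String.ofList [bc b] := by
  interval_cases b <;> decide

-- ===== VERDICT (by name: the statement is the Claim_ definition above) =====
theorem nthCharacter_spec : Claim_equal_nthCharacter := by
  intro s r n _hdom hpre
  unfold Spec_nthCharacter
  have hpre' : PySem.Raise.InRange s.toList.length n := hpre
  by_cases hr : r ≤ 0
  · rw [portA_unfold, PySem.List.pyRange_one_eq_nil hr]
    rw [nthCharacter_alt, if_pos hr]
    rfl
  · -- r > 0
    have hrpos : 0 < r := by omega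
    have hlen : 0 < s.toList.length := by
      rcases hpre' with ⟨h1, h2⟩
      by_contra h
      have : s.toList.length = 0 := by omega
      rw [this] at h1 h2
      simp at h1 h2; omega
    set ls := s.toList with hls
    set len := ls.length with hlenDef
    -- A's final string
    rw [portA_unfold,
      outer_spec ls (PySem.List.pyRange 0 r 1) ls rfl]
    have hL : (PySem.List.pyRange 0 r 1).length = r.toNat := by
      rw [PySem.List.length_pyRange_one]; omega
    rw [hL]
    obtain ⟨m, hm⟩ : ∃ m, r.toNat = m + 1 := ⟨r.toNat - 1, by omega⟩
    set n' : Nat := (PySem.Int.mod n (len : Int)).toNat with hn'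
    have hn'lt : n' < len := by
      have h1 : 0 ≤ PySem.Int.mod n (len : Int) := by
        rw [PySem.Int.mod_eq_emod_of_pos (by exact_mod_cast hlen)]
        exact Int.emod_nonneg n (by omega)
      have h2 : PySem.Int.mod n (len : Int) < (len : Int) := by
        rw [PySem.Int.mod_eq_emod_of_pos (by exact_mod_cast hlen)]
        exact Int.emod_lt_of_pos n (by exact_mod_cast hlen)
      omega
    have hA : PySem.List.pyGetD (roundSpec^[r.toNat] ls) n ' '
        = (roundSpec^[r.toNat] ls).getD n' ' ' := by
      rw [pyGetD_mod _ n (by rw [iter_length]; omega)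
        (by rw [iter_length]; exact hpre')]
      congr 1
      rw [iter_length]
    rw [hA, hm, iter_getD m ls n' (by omega)]
    -- B's side
    rw [nthCharacter_alt, if_neg hr]
    simp only [← hls, ← hlenDef, ← hn', hm, altTrace_eq (m+1) n' 0, Nat.zero_xor]
    rw [PySem.List.pyGetD_natCast]
    have hbv : (if ls.getD (n' / 2 ^ (m+1)) ' ' = '0' then 0 else 1)
        = bv (ls.getD (n' / 2 ^ (m+1)) ' ') := rfl
    rw [hbv, bit_toStr _ (by
      have h1 : bv (ls.getD (n' / 2 ^ (m+1)) ' ') ≤ 1 := by unfold bv; split <;> omega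
      have h2 := par_le_one (m+1) n'
      interval_cases h : bv (ls.getD (n' / 2 ^ (m+1)) ' ') <;>
        interval_cases h' : par (m+1) n' <;> decide)]
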